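-- pv_equiv track=rewrite | github.com/dongju0124/dongju | 백준/Silver/1262. 알파벳 다이아몬드/알파벳 다이아몬드.py | solve_diamond_tiling
-- ===== SOURCE A (Python) =====
-- def solve_diamond_tiling(N, R1, C1, R2, C2):
--     diamond_size = 2 * N - 1
--
--     result = []
--
--     for r in range(R1, R2 + 1):
--         row = []
--         for c in range(C1, C2 + 1):
--             local_r = r % diamond_size
--             local_c = c % diamond_size
--
--             center = N - 1
--             dr = abs(local_r - center)
--             dc = abs(local_c - center)
--
--             distance = dr + dc
--
--             if distance > N - 1:
--                 row.append('.')
--             else: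
--                 alphabet_index = distance % 26
--                 row.append(chr(ord('a') + alphabet_index))
--
--         result.append(''.join(row))
--
--     return result
-- ===== SOURCE B (Python) =====
-- def solve_diamond_tiling(N, R1, C1, R2, C2):
--     D = 2 * N - 1
--     if R1 > R2:
--         return []
--     # phase 1: column residues, computed once
--     cols = [c % D for c in range(C1, C2 + 1)]
--
--     def build_row(lr):
--         dr = abs(lr - (N - 1))
--         return ''.join(
--             '.' if dr + abs(lc - (N - 1)) >= N
--             else chr(97 + (dr + abs(lc - (N - 1))) % 26)
--             for lc in cols)
--
--     # phase 2: rows looked up by residue; each distinct row built once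
--     cache = {}
--     out = []
--     for r in range(R1, R2 + 1):
--         lr = r % D
--         if lr not in cache:
--             cache[lr] = build_row(lr)
--         out.append(cache[lr])
--     return out
-- ===== Notes on version B (the rewrite author's own statement) =====
-- stated objective: alternative
-- what changed: B splits the work into two phases — precompute the column residues once, then emit rows by looking up a dict that memoizes each whole output row by its row residue — replacing A's per-cell nested loops that recompute the formula for every cell.
import Mathlib
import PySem

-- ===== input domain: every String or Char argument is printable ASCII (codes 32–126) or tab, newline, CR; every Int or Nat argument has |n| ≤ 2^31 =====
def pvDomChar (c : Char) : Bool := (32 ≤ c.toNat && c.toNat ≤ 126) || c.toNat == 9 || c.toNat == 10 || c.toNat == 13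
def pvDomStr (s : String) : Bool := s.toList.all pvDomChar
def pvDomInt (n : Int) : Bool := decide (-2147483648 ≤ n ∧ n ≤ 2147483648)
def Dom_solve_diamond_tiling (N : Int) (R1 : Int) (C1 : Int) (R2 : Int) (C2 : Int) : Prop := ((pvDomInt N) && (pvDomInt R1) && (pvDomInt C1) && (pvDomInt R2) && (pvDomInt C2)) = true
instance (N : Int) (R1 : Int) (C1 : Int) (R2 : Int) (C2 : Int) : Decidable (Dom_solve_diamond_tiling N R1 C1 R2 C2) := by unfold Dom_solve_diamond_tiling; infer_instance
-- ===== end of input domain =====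

-- B precomputes the column residues once and emits rows via a dict memoizing each whole output row by
-- its row residue — a two-phase alternative to A's per-cell nested loops.

-- ===== PORT A =====
def solve_diamond_tiling (N : Int) (R1 : Int) (C1 : Int) (R2 : Int) (C2 : Int) : List String :=
  let diamond_size := 2 * N - 1
  (PySem.List.pyRange R1 (R2 + 1) 1).foldl (fun result r =>
    let row := (PySem.List.pyRange C1 (C2 + 1) 1).foldl (fun row c =>
      let local_r := PySem.Int.mod r diamond_size
      let local_c := PySem.Int.mod c diamond_size
      let center := N - 1
      let dr := |local_r - center|
      let dc := |local_c - center|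
      let distance := dr + dc
      if distance > N - 1 then row ++ ["."]
      else row ++ [String.ofList [Char.ofNat (97 + (PySem.Int.mod distance 26)).toNat]]) []  -- chr(ord('a')+i), 0 ≤ i < 26: exact
    result ++ [PySem.Str.join "" row]) []

-- ===== PORT B =====
-- build_row lr: one output row for row residue lr, over the precomputed column residues
def pvBuildRow (N : Int) (cols : List Int) (lr : Int) : String :=
  let dr := |lr - (N - 1)|
  PySem.Str.join "" (cols.map (fun lc =>
    if dr + |lc - (N - 1)| ≥ N then "."
    else String.ofList [Char.ofNat (97 + (PySem.Int.mod (dr + |lc - (N - 1)|) 26)).toNat]))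

def solve_diamond_tiling_alt (N : Int) (R1 : Int) (C1 : Int) (R2 : Int) (C2 : Int) : List String :=
  let D := 2 * N - 1
  if R1 > R2 then [] else
  let cols := (PySem.List.pyRange C1 (C2 + 1) 1).map (fun c => PySem.Int.mod c D)
  let final := (PySem.List.pyRange R1 (R2 + 1) 1).foldl
    (fun (st : PySem.Dict Int String × List String) r =>
      let lr := PySem.Int.mod r D
      let cache := if st.1.contains lr then st.1 else st.1.insert lr (pvBuildRow N cols lr)
      (cache, st.2 ++ [cache.getD lr ""]))
    (PySem.Dict.empty, [])
  final.2

-- ===== PRECONDITION & SPEC =====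
def Spec_solve_diamond_tiling (N : Int) (R1 : Int) (C1 : Int) (R2 : Int) (C2 : Int) (out : List String) : Prop := out = solve_diamond_tiling_alt N R1 C1 R2 C2
instance (N : Int) (R1 : Int) (C1 : Int) (R2 : Int) (C2 : Int) (out : List String) : Decidable (Spec_solve_diamond_tiling N R1 C1 R2 C2 out) := by unfold Spec_solve_diamond_tiling; infer_instance

-- ===== CLAIM (what is proved, stated in full; the proofs are below) =====
def Claim_equal_solve_diamond_tiling : Prop := ∀ (N : Int) (R1 : Int) (C1 : Int) (R2 : Int) (C2 : Int), Dom_solve_diamond_tiling N R1 C1 R2 C2 → Spec_solve_diamond_tiling N R1 C1 R2 C2 (solve_diamond_tiling N R1 C1 R2 C2)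

-- ===== LEMMAS AND PROOFS =====

-- an append-accumulating foldl is a map
theorem pvFoldlAppendMap {α β : Type} (g : α → β) (xs : List α) (init : List β) :
    xs.foldl (fun acc x => acc ++ [g x]) init = init ++ xs.map g := by
  induction xs generalizing init with
  | nil => simp
  | cons x xs ih => simp [List.foldl, ih]

-- lookup in a dict all of whose values are f of their key
theorem pvGetDOfInv (d : PySem.Dict Int String) (f : Int → String) (k : Int) (dflt : String)
    (hinv : ∀ p ∈ d.items, p.2 = f p.1) (hc : d.contains k = true) :
    d.getD k dflt = f k := by
  unfold PySem.Dict.contains at hc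
  obtain ⟨p, hp, hpk⟩ := List.any_eq_true.mp hc
  unfold PySem.Dict.getD PySem.Dict.get?
  have hsome : (d.items.find? (fun q => q.1 == k)).isSome :=
    List.find?_isSome.mpr ⟨p, hp, hpk⟩
  obtain ⟨q, hq⟩ := Option.isSome_iff_exists.mp hsome
  have hqmem := List.mem_of_find?_eq_some hq
  have hqk : q.1 = k := by simpa using List.find?_some hq
  simp [hq, hinv q hqmem, hqk]

-- inserting a fresh key appends its item
theorem pvInsertFresh (d : PySem.Dict Int String) (k : Int) (v : String)
    (hc : d.contains k = false) : (d.insert k v).items = d.items ++ [(k, v)] := by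
  simp [PySem.Dict.insert, hc]

-- the memoizing fold emits exactly (fun r => f (r mod-like key)) per element
theorem pvMemoFold (f : Int → String) (key : Int → Int)
    (rs : List Int) (cache : PySem.Dict Int String) (out : List String)
    (hinv : ∀ p ∈ cache.items, p.2 = f p.1) :
    (rs.foldl (fun (st : PySem.Dict Int String × List String) r =>
        let lr := key r
        let cache := if st.1.contains lr then st.1 else st.1.insert lr (f lr)
        (cache, st.2 ++ [cache.getD lr ""])) (cache, out)).2
      = out ++ rs.map (fun r => f (key r)) := by
  induction rs generalizing cache out with
  | nil => simp
  | cons r rs ih =>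
    simp only [List.foldl, List.map]
    by_cases hc : cache.contains (key r) = true
    · rw [if_pos hc]
      have hget : cache.getD (key r) "" = f (key r) := pvGetDOfInv cache f (key r) "" hinv hc
      rw [hget, ih cache (out ++ [f (key r)]) hinv]
      simp
    · rw [if_neg hc]
      have hcf : cache.contains (key r) = false := by
        cases h : cache.contains (key r) <;> simp_all
      have hinv' : ∀ p ∈ (cache.insert (key r) (f (key r))).items, p.2 = f p.1 := by
        intro p hp
        rw [pvInsertFresh cache (key r) (f (key r)) hcf] at hp
        rcases List.mem_append.mp hp with h | h
        · exact hinv p h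
        · simp at h; simp [h]
      have hget : (cache.insert (key r) (f (key r))).getD (key r) "" = f (key r) := by
        rw [PySem.Dict.getD_insert]; simp
      rw [hget, ih _ (out ++ [f (key r)]) hinv']
      simp

-- A's row for r equals B's memo row for r's residue
theorem pvFoldlIteAppend (p : Int → Prop) [DecidablePred p] (u : Int → String) (v : Int → String)
    (xs : List Int) (init : List String) :
    xs.foldl (fun row c => if p c then row ++ [u c] else row ++ [v c]) init
      = init ++ xs.map (fun c => if p c then u c else v c) := by
  induction xs generalizing init with
  | nil => simp
  | cons x xs ih =>
    simp only [List.foldl, List.map]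
    split_ifs with h <;> rw [ih] <;> simp

theorem pvRowEq (N C1 C2 r : Int) :
    PySem.Str.join "" ((PySem.List.pyRange C1 (C2 + 1) 1).foldl (fun row c =>
      if |PySem.Int.mod r (2*N-1) - (N - 1)| + |PySem.Int.mod c (2*N-1) - (N - 1)| > N - 1
        then row ++ ["."]
        else row ++ [String.ofList [Char.ofNat (97 + (PySem.Int.mod (|PySem.Int.mod r (2*N-1) - (N - 1)| + |PySem.Int.mod c (2*N-1) - (N - 1)|) 26)).toNat]]) [])
    = pvBuildRow N ((PySem.List.pyRange C1 (C2 + 1) 1).map (fun c => PySem.Int.mod c (2*N-1)))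
        (PySem.Int.mod r (2*N-1)) := by
  rw [pvFoldlIteAppend (fun c => |PySem.Int.mod r (2*N-1) - (N - 1)| + |PySem.Int.mod c (2*N-1) - (N - 1)| > N - 1)
        (fun _ => ".")
        (fun c => String.ofList [Char.ofNat (97 + (PySem.Int.mod (|PySem.Int.mod r (2*N-1) - (N - 1)| + |PySem.Int.mod c (2*N-1) - (N - 1)|) 26)).toNat])]
  unfold pvBuildRow
  simp only [List.nil_append, List.map_map]
  congr 1
  apply List.map_congr_left
  intro c _
  simp only [Function.comp]
  have h : (|PySem.Int.mod r (2*N-1) - (N - 1)| + |PySem.Int.mod c (2*N-1) - (N - 1)| > N - 1)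
      ↔ (|PySem.Int.mod r (2*N-1) - (N - 1)| + |PySem.Int.mod c (2*N-1) - (N - 1)| ≥ N) := by omega
  by_cases hc : |PySem.Int.mod r (2*N-1) - (N - 1)| + |PySem.Int.mod c (2*N-1) - (N - 1)| ≥ N
  · rw [if_pos (h.mpr hc), if_pos hc]
  · rw [if_neg (fun hx => hc (h.mp hx)), if_neg hc]

-- ===== VERDICT (by name: the statement is the Claim_ definition above) =====
theorem solve_diamond_tiling_spec : Claim_equal_solve_diamond_tiling := by
  intro N R1 C1 R2 C2 _
  unfold Spec_solve_diamond_tiling solve_diamond_tiling solve_diamond_tiling_alt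
  simp only []
  by_cases hR : R1 > R2
  · rw [if_pos hR, show PySem.List.pyRange R1 (R2+1) 1 = [] from PySem.List.pyRange_one_eq_nil (by omega)]
    simp
  rw [if_neg hR]
  rw [pvFoldlAppendMap (fun r => PySem.Str.join "" ((PySem.List.pyRange C1 (C2 + 1) 1).foldl (fun row c =>
      if |PySem.Int.mod r (2*N-1) - (N - 1)| + |PySem.Int.mod c (2*N-1) - (N - 1)| > N - 1
        then row ++ ["."]
        else row ++ [String.ofList [Char.ofNat (97 + (PySem.Int.mod (|PySem.Int.mod r (2*N-1) - (N - 1)| + |PySem.Int.mod c (2*N-1) - (N - 1)|) 26)).toNat]]) []))]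
  rw [pvMemoFold (pvBuildRow N ((PySem.List.pyRange C1 (C2 + 1) 1).map (fun c => PySem.Int.mod c (2*N-1))))
      (fun r => PySem.Int.mod r (2*N-1)) _ _ _ (by simp [PySem.Dict.empty])]
  simp only [List.nil_append]
  exact List.map_congr_left (fun r _ => pvRowEq N C1 C2 r)
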